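-- pv_equiv track=rewrite | github.com/GrupoUS/VSCODE | @project-core/backups/20250612_141416/@project-core/memory/native-rag-system/cognee_ecl_pipeline/ecl_pipeline.py | _classify_semantic_category
-- ===== SOURCE A (Python) =====
-- def _classify_semantic_category(entity_name: str, entity_type: str) -> str:
--     """
--     Classify entity into semantic categories
--     """
--     # Simple semantic classification
--     if entity_type == 'TECHNOLOGY':
--         if any(tech in entity_name.lower() for tech in ['react', 'next', 'vue', 'angular']):
--             return 'frontend_framework'
--         elif any(tech in entity_name.lower() for tech in ['node', 'python', 'java', 'go']):
--             return 'backend_technology'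
--         elif any(tech in entity_name.lower() for tech in ['postgres', 'mysql', 'mongo', 'redis']):
--             return 'database_technology'
--         else:
--             return 'general_technology'
--     elif entity_type == 'CONCEPT':
--         return 'domain_concept'
--     elif entity_type == 'METHOD':
--         return 'implementation_method'
--     else:
--         return 'general_entity'
-- ===== SOURCE B (Python) =====
-- # Flat keyword->priority-rank map; category = best (minimum) rank among all
-- # keywords occurring in the lowercased name. Equivalent to the branch chain
-- # because rank 0 beats 1 beats 2, i.e. the first group with any match wins.
-- _KW_RANK = {
--     'react': 0, 'next': 0, 'vue': 0, 'angular': 0,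
--     'node': 1, 'python': 1, 'java': 1, 'go': 1,
--     'postgres': 2, 'mysql': 2, 'mongo': 2, 'redis': 2,
-- }
-- _TECH_CATS = ['frontend_framework', 'backend_technology', 'database_technology']
-- _TYPE_MAP = {'CONCEPT': 'domain_concept', 'METHOD': 'implementation_method'}
--
--
-- def _classify_semantic_category(entity_name: str, entity_type: str) -> str:
--     if entity_type != 'TECHNOLOGY':
--         return _TYPE_MAP.get(entity_type, 'general_entity')
--     name = entity_name.lower()
--     best = min((rank for kw, rank in _KW_RANK.items() if kw in name), default=None)
--     return _TECH_CATS[best] if best is not None else 'general_technology'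
-- ===== Notes on version B (the rewrite author's own statement) =====
-- stated objective: alternative
-- what changed: Replaces the if/elif chain of per-group any() scans with a single flat keyword->priority-rank map: B collects the ranks of all keywords occurring in the lowercased name, takes the minimum rank and indexes a category list (min rank = first matching group), with a dict dispatch for non-TECHNOLOGY types.
import Mathlib
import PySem

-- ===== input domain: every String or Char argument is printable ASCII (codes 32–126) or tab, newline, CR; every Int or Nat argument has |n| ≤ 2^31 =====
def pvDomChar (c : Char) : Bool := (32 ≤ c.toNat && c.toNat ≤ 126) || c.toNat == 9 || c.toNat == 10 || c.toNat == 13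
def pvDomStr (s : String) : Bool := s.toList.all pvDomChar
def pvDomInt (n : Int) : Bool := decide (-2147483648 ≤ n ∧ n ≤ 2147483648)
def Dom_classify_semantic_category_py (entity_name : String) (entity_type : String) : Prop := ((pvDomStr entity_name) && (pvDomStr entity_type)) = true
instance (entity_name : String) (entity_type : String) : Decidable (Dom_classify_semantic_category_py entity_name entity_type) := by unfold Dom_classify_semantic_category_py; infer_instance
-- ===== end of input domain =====

-- B replaces A's if/elif chain of per-group any() scans by a flat keyword->rank map:
-- it takes the minimum rank among all keywords occurring in the lowercased name and
-- indexes a category list (min rank = first matching group); objective: alternative.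


-- ===== PORT A =====
def classify_semantic_category_py (entity_name : String) (entity_type : String) : String :=
  if entity_type == "TECHNOLOGY" then
    if (["react", "next", "vue", "angular"] : List String).any
        (fun tech => PySem.Str.isIn tech (PySem.Str.lower entity_name)) then
      "frontend_framework"
    else if (["node", "python", "java", "go"] : List String).any
        (fun tech => PySem.Str.isIn tech (PySem.Str.lower entity_name)) then
      "backend_technology"
    else if (["postgres", "mysql", "mongo", "redis"] : List String).any
        (fun tech => PySem.Str.isIn tech (PySem.Str.lower entity_name)) then
      "database_technology"
    else
      "general_technology"
  else if entity_type == "CONCEPT" then "domain_concept"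
  else if entity_type == "METHOD" then "implementation_method"
  else "general_entity"

-- ===== PORT B =====
def pvKwRank : List (String × Nat) :=
  [("react", 0), ("next", 0), ("vue", 0), ("angular", 0),
   ("node", 1), ("python", 1), ("java", 1), ("go", 1),
   ("postgres", 2), ("mysql", 2), ("mongo", 2), ("redis", 2)]

def pvTechCats : List String :=
  ["frontend_framework", "backend_technology", "database_technology"]

def pvTypeMap : PySem.Dict String String :=
  PySem.Dict.ofList [("CONCEPT", "domain_concept"), ("METHOD", "implementation_method")]

def classify_semantic_category_py_alt (entity_name : String) (entity_type : String) : String :=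
  if entity_type != "TECHNOLOGY" then
    PySem.Dict.getD pvTypeMap entity_type "general_entity"
  else
    let name := PySem.Str.lower entity_name
    -- min(rank for kw, rank in _KW_RANK.items() if kw in name, default=None):
    -- the generator is a filterMap, min with default=None is min? matched on
    let best := PySem.List.min?
      (pvKwRank.filterMap (fun kr => if PySem.Str.isIn kr.1 name then some kr.2 else none))
      (fun r => r)
    match best with
    | some r => pvTechCats.getD r "general_technology"
    | none => "general_technology"

-- ===== PRECONDITION & SPEC =====
def Spec_classify_semantic_category_py (entity_name : String) (entity_type : String) (out : String) : Prop := out = classify_semantic_category_py_alt entity_name entity_type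
instance (entity_name : String) (entity_type : String) (out : String) : Decidable (Spec_classify_semantic_category_py entity_name entity_type out) := by unfold Spec_classify_semantic_category_py; infer_instance

-- ===== CLAIM (what is proved, stated in full; the proofs are below) =====
def Claim_equal_classify_semantic_category_py : Prop := ∀ (entity_name : String) (entity_type : String), Dom_classify_semantic_category_py entity_name entity_type → Spec_classify_semantic_category_py entity_name entity_type (classify_semantic_category_py entity_name entity_type)

-- ===== LEMMAS AND PROOFS =====
-- the finite heart of the equivalence, abstracted over the 12 substring tests
theorem pvKey (b1 b2 b3 b4 b5 b6 b7 b8 b9 b10 b11 b12 : Bool) :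
    (if (b1 || (b2 || (b3 || (b4 || false)))) = true then "frontend_framework"
     else if (b5 || (b6 || (b7 || (b8 || false)))) = true then "backend_technology"
     else if (b9 || (b10 || (b11 || (b12 || false)))) = true then "database_technology"
     else "general_technology")
    = (match PySem.List.min?
         (List.filterMap (fun p : Bool × Nat => if p.1 then some p.2 else none)
           [(b1, 0), (b2, 0), (b3, 0), (b4, 0),
            (b5, 1), (b6, 1), (b7, 1), (b8, 1),
            (b9, 2), (b10, 2), (b11, 2), (b12, 2)])
         (fun r => r) with
       | some r => pvTechCats.getD r "general_technology"
       | none => "general_technology") := by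
  cases b1 <;> cases b2 <;> cases b3 <;> cases b4 <;> cases b5 <;> cases b6 <;>
    cases b7 <;> cases b8 <;> cases b9 <;> cases b10 <;> cases b11 <;> cases b12 <;> rfl

-- ===== VERDICT (by name: the statement is the Claim_ definition above) =====
set_option maxHeartbeats 1000000 in
theorem classify_semantic_category_py_spec : Claim_equal_classify_semantic_category_py := by
  intro n t _
  unfold Spec_classify_semantic_category_py classify_semantic_category_py
    classify_semantic_category_py_alt
  by_cases h : t == "TECHNOLOGY"
  · have ht : t = "TECHNOLOGY" := eq_of_beq h
    subst ht
    simp only [beq_self_eq_true, if_true, bne_self_eq_false, Bool.false_eq_true, if_false,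
      List.any_cons, List.any_nil]
    have hk := pvKey
      (PySem.Str.isIn "react" (PySem.Str.lower n)) (PySem.Str.isIn "next" (PySem.Str.lower n))
      (PySem.Str.isIn "vue" (PySem.Str.lower n)) (PySem.Str.isIn "angular" (PySem.Str.lower n))
      (PySem.Str.isIn "node" (PySem.Str.lower n)) (PySem.Str.isIn "python" (PySem.Str.lower n))
      (PySem.Str.isIn "java" (PySem.Str.lower n)) (PySem.Str.isIn "go" (PySem.Str.lower n))
      (PySem.Str.isIn "postgres" (PySem.Str.lower n)) (PySem.Str.isIn "mysql" (PySem.Str.lower n))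
      (PySem.Str.isIn "mongo" (PySem.Str.lower n)) (PySem.Str.isIn "redis" (PySem.Str.lower n))
    simp only [pvKwRank, List.filterMap_cons, List.filterMap_nil] at hk ⊢
    exact hk
  · have h' : (t != "TECHNOLOGY") = true := by
      simp only [bne_iff_ne]; intro e; exact h (by simp [e])
    simp only [h, Bool.false_eq_true, if_false, h', if_true]
    by_cases hc : t == "CONCEPT"
    · have : t = "CONCEPT" := eq_of_beq hc
      subst this; rfl
    · by_cases hm : t == "METHOD"
      · have : t = "METHOD" := eq_of_beq hm
        subst this; rfl
      · have hc' : ("CONCEPT" == t) = false := by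
          simp only [beq_eq_false_iff_ne]; intro e; exact hc (by simp [e])
        have hm' : ("METHOD" == t) = false := by
          simp only [beq_eq_false_iff_ne]; intro e; exact hm (by simp [e])
        simp [hc, hm, hc', hm', List.find?, pvTypeMap, PySem.Dict.ofList, PySem.Dict.empty,
          PySem.Dict.update, PySem.Dict.getD, PySem.Dict.get?, PySem.Dict.insert,
          PySem.Dict.contains]
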